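-- pv_equiv track=rewrite | github.com/Sathishr424/LeetcodeProblems | 4135-ConcatenateNonZeroDigitsAndMultiplyBySumI/4135-ConcatenateNonZeroDigitsAndMultiplyBySumI.py | sumAndMultiply
-- ===== SOURCE A (Python) =====
-- def sumAndMultiply(n: int) -> int:
--     st = str(n)
--     ans = 0
--     s = 0
--     for d in st:
--         if d != '0':
--             ans = ans * 10 + int(d)
--             s += int(d)
--
--     return ans * s
-- ===== SOURCE B (Python) =====
-- def sumAndMultiply(n: int) -> int:
--     # Pure-arithmetic version: extract digits right-to-left with divmod,
--     # no string conversion at all.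
--     ans = 0
--     s = 0
--     place = 1
--     while n > 0:
--         n, d = divmod(n, 10)
--         if d:
--             ans += d * place
--             place *= 10
--             s += d
--     return ans * s
-- ===== Notes on version B (the rewrite author's own statement) =====
-- stated objective: alternative
-- what changed: Replaces str(n) plus a left-to-right Horner accumulation over characters by pure divmod arithmetic extracting digits right-to-left with a running place value, with no string conversion at all.
import Mathlib
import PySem

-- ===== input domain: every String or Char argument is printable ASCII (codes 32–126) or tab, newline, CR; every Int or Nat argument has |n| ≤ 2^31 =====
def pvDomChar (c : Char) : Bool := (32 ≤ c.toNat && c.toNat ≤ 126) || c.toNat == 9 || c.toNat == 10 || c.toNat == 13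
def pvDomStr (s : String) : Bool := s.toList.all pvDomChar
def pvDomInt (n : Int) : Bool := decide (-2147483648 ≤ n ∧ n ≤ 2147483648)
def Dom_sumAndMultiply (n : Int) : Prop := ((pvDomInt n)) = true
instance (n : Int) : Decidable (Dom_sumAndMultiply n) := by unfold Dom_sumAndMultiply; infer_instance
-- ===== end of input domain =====

-- B replaces A's str(n)-then-Horner character scan by pure divmod digit extraction (alternative
-- decomposition, same cost); on negative n A raises ValueError, excluded by Pre_.

-- ===== PORT A =====
-- Python's int(d) on a single character, written as d.toNat - 48: exact for the ASCII digit
-- characters str(n) produces when n ≥ 0; on the '-' of a negative n Python raises ValueError,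
-- which Pre_sumAndMultiply excludes.
def sumAndMultiply (n : Int) : Int :=
  let st := PySem.Int.toChars n
  let p := st.foldl
    (fun (acc : Int × Int) d =>
      if d ≠ '0' then (acc.1 * 10 + ((d.toNat : Int) - 48), acc.2 + ((d.toNat : Int) - 48))
      else acc)
    (0, 0)
  p.1 * p.2

-- ===== PORT B =====
-- the while-loop of Source B, state (ans, s, place); 'n, d = divmod(n, 10)' each turn.
-- fuel only makes the recursion structural: n.toNat + 1 turns always suffice (each turn
-- divides a positive n by 10).
def sumAndMultiplyLoop (fuel : Nat) (n ans s place : Int) : Int × Int :=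
  match fuel with
  | 0 => (ans, s)
  | fuel + 1 =>
    if 0 < n then
      let d := PySem.Int.mod n 10
      let n' := PySem.Int.floordiv n 10
      if d ≠ 0 then sumAndMultiplyLoop fuel n' (ans + d * place) (s + d) (place * 10)
      else sumAndMultiplyLoop fuel n' ans s place
    else (ans, s)

def sumAndMultiply_alt (n : Int) : Int :=
  let q := sumAndMultiplyLoop (n.toNat + 1) n 0 0 1
  q.1 * q.2

-- ===== PRECONDITION & SPEC =====
-- Pre_ excludes exactly the negative n: there A's per-character int('-') raises ValueError.
def Pre_sumAndMultiply (n : Int) : Prop := 0 ≤ n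
instance (n : Int) : Decidable (Pre_sumAndMultiply n) := by unfold Pre_sumAndMultiply; infer_instance
def pvWitness_sumAndMultiply : Int := (10305)

def Spec_sumAndMultiply (n : Int) (out : Int) : Prop := out = sumAndMultiply_alt n
instance (n : Int) (out : Int) : Decidable (Spec_sumAndMultiply n out) := by unfold Spec_sumAndMultiply; infer_instance

-- ===== CLAIM (what is proved, stated in full; the proofs are below) =====
def Claim_equal_sumAndMultiply : Prop := ∀ (n : Int), Dom_sumAndMultiply n → Pre_sumAndMultiply n → Spec_sumAndMultiply n (sumAndMultiply n)

-- ===== LEMMAS AND PROOFS =====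

-- Horner value of the nonzero decimal digits of m (most significant first), and their sum:
-- the common characterisation both ports are reduced to.
def nzH (m : Nat) : Int :=
  if h : m = 0 then 0
  else if m % 10 = 0 then nzH (m / 10) else nzH (m / 10) * 10 + ((m % 10 : Nat) : Int)
termination_by m
decreasing_by all_goals exact Nat.div_lt_self (Nat.pos_of_ne_zero h) (by omega)

def nzS (m : Nat) : Int :=
  if h : m = 0 then 0
  else if m % 10 = 0 then nzS (m / 10) else nzS (m / 10) + ((m % 10 : Nat) : Int)
termination_by m
decreasing_by all_goals exact Nat.div_lt_self (Nat.pos_of_ne_zero h) (by omega)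

theorem nzH_zero : nzH 0 = 0 := by rw [nzH]; simp
theorem nzS_zero : nzS 0 = 0 := by rw [nzS]; simp
theorem nzH_pos {m : Nat} (h : m ≠ 0) :
    nzH m = if m % 10 = 0 then nzH (m / 10) else nzH (m / 10) * 10 + ((m % 10 : Nat) : Int) := by
  rw [nzH]; simp [h]
theorem nzS_pos {m : Nat} (h : m ≠ 0) :
    nzS m = if m % 10 = 0 then nzS (m / 10) else nzS (m / 10) + ((m % 10 : Nat) : Int) := by
  rw [nzS]; simp [h]

-- A's fused loop, split into its two independent passes over the nonzero characters.
theorem foldA_filter (cs : List Char) (a s : Int) :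
    cs.foldl
      (fun (acc : Int × Int) d =>
        if d ≠ '0' then (acc.1 * 10 + ((d.toNat : Int) - 48), acc.2 + ((d.toNat : Int) - 48))
        else acc) (a, s)
    = ((cs.filter (· ≠ '0')).foldl (fun x c => x * 10 + ((c.toNat : Int) - 48)) a,
       s + ((cs.filter (· ≠ '0')).map (fun c => (c.toNat : Int) - 48)).sum) := by
  induction cs generalizing a s with
  | nil => simp
  | cons c cs ih =>
    by_cases hc : c = '0'
    · subst hc
      rw [List.foldl_cons, if_neg (by simp), ih]
      simp
    · have hfc : List.filter (fun x => decide (x ≠ '0')) (c :: cs)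
          = c :: List.filter (fun x => decide (x ≠ '0')) cs := by simp [hc]
      rw [List.foldl_cons, if_pos hc, ih]
      rw [show (cs.filter (· ≠ '0')) = List.filter (fun x => decide (x ≠ '0')) cs from rfl] at *
      rw [show ((c :: cs).filter (· ≠ '0')) = List.filter (fun x => decide (x ≠ '0')) (c :: cs) from rfl]
      rw [hfc, List.foldl_cons, List.map_cons, List.sum_cons]
      rw [Prod.mk.injEq]
      exact ⟨rfl, by ring⟩

theorem digitChar_val {d : Nat} (hd : d < 10) : ((Nat.digitChar d).toNat : Int) - 48 = (d : Int) := by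
  interval_cases d <;> decide

theorem digitChar_ne_zero {d : Nat} (hd : d < 10) : (Nat.digitChar d ≠ '0') ↔ d ≠ 0 := by
  interval_cases d <;> decide

theorem toDigits_horner (m : Nat) :
    ((Nat.toDigits 10 m).filter (· ≠ '0')).foldl (fun x c => x * 10 + ((c.toNat : Int) - 48)) 0
      = nzH m
    ∧ (((Nat.toDigits 10 m).filter (· ≠ '0')).map (fun c => (c.toNat : Int) - 48)).sum = nzS m := by
  induction m using Nat.strong_induction_on with
  | _ m ih =>
    by_cases hm : m < 10
    · rw [Nat.toDigits_of_lt_base hm]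
      by_cases h0 : m = 0
      · subst h0
        constructor
        · rw [nzH_zero]; simp [Nat.digitChar]
        · rw [nzS_zero]; simp [Nat.digitChar]
      · have hne : Nat.digitChar m ≠ '0' := (digitChar_ne_zero hm).mpr h0
        have hmod : m % 10 = m := Nat.mod_eq_of_lt hm
        have hdiv : m / 10 = 0 := Nat.div_eq_of_lt hm
        rw [nzH_pos h0, nzS_pos h0, hmod, hdiv, if_neg h0, if_neg h0, nzH_zero, nzS_zero]
        constructor
        · simp [hne, digitChar_val hm]
        · simp [hne, digitChar_val hm]
    · have hle : 10 ≤ m := by omega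
      rw [Nat.toDigits_of_base_le (by omega) hle]
      have hlt : m / 10 < m := Nat.div_lt_self (by omega) (by omega)
      obtain ⟨ih1, ih2⟩ := ih (m / 10) hlt
      have hd : m % 10 < 10 := Nat.mod_lt _ (by omega)
      rw [nzH_pos (by omega), nzS_pos (by omega)]
      by_cases h0 : m % 10 = 0
      · have hz : Nat.digitChar (m % 10) = '0' := by rw [h0]; rfl
        rw [if_pos h0, if_pos h0]
        constructor
        · rw [List.filter_append, List.foldl_append, ih1]
          simp [hz]
        · rw [List.filter_append, List.map_append, List.sum_append, ih2]
          simp [hz]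
      · have hne : Nat.digitChar (m % 10) ≠ '0' := (digitChar_ne_zero hd).mpr h0
        rw [if_neg h0, if_neg h0]
        constructor
        · rw [List.filter_append, List.foldl_append, ih1]
          simp [hne, digitChar_val hd]
        · rw [List.filter_append, List.map_append, List.sum_append, ih2]
          simp [hne, digitChar_val hd]

-- B's loop computes the same pair, from the least significant digit up.
theorem loopB_eq (fuel : Nat) : ∀ (m : Nat), m < fuel → ∀ (a s p : Int),
    sumAndMultiplyLoop fuel (m : Int) a s p = (a + p * nzH m, s + nzS m) := by
  induction fuel with
  | zero => intro m hm; omega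
  | succ fuel ih =>
    intro m hm a s p
    by_cases h0 : m = 0
    · subst h0
      rw [sumAndMultiplyLoop, if_neg (by omega), nzH_zero, nzS_zero]
      simp
    · have hpos : (0 : Int) < (m : Int) := by exact_mod_cast Nat.pos_of_ne_zero h0
      have hmod : PySem.Int.mod (m : Int) 10 = ((m % 10 : Nat) : Int) := by
        rw [PySem.Int.mod_eq_emod_of_pos (by omega)]; push_cast; rfl
      have hdiv : PySem.Int.floordiv (m : Int) 10 = ((m / 10 : Nat) : Int) := by
        rw [PySem.Int.floordiv_eq_ediv_of_pos (by omega)]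
        exact_mod_cast rfl
      have hfuel : m / 10 < fuel :=
        Nat.lt_of_lt_of_le (Nat.div_lt_self (Nat.pos_of_ne_zero h0) (by omega)) (by omega)
      rw [sumAndMultiplyLoop, if_pos hpos]
      simp only [hmod, hdiv]
      rw [nzH_pos h0, nzS_pos h0]
      by_cases hz : m % 10 = 0
      · rw [if_neg (by simp [hz]), ih (m / 10) hfuel, if_pos hz, if_pos hz]
      · rw [if_pos (by exact_mod_cast hz), ih (m / 10) hfuel, if_neg hz, if_neg hz,
          Prod.mk.injEq]
        constructor <;> push_cast <;> ring

-- ===== VERDICT (by name: the statement is the Claim_ definition above) =====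
theorem sumAndMultiply_spec : Claim_equal_sumAndMultiply := by
  intro n _ hpre
  unfold Spec_sumAndMultiply
  have hn : n = ((n.toNat : Nat) : Int) := (Int.toNat_of_nonneg hpre).symm
  have htc : PySem.Int.toChars n = Nat.toDigits 10 n.toNat := by
    unfold PySem.Int.toChars
    rw [if_neg (by omega)]
  obtain ⟨h1, h2⟩ := toDigits_horner n.toNat
  simp only [sumAndMultiply, sumAndMultiply_alt, htc, foldA_filter, h1, h2]
  rw [show sumAndMultiplyLoop (n.toNat + 1) n 0 0 1
        = sumAndMultiplyLoop (n.toNat + 1) ((n.toNat : Nat) : Int) 0 0 1 from by rw [← hn],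
      loopB_eq (n.toNat + 1) n.toNat (by omega)]
  simp
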